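-- pv_equiv track=rewrite | github.com/elikrok/cmmc_tool | scanner/config_checker.py | _ac_limit_transactions
-- ===== SOURCE A (Python) =====
-- def _parse_user_privileges(lines):
--     users = {}
--     for raw in lines:
--         low = raw.strip().lower()
--         if not low.startswith('username '):
--             continue
--         parts = low.split()
--         if len(parts) < 2:
--             continue
--         name = parts[1]
--         priv = None
--         roles = []
--         if ' privilege ' in low:
--             try:
--                 idx = parts.index('privilege')
--                 if idx + 1 < len(parts):
--                     priv = int(parts[idx + 1])
--             except Exception:
--                 pass
--         if ' role ' in low:
--             for i, tok in enumerate(parts):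
--                 if tok == 'role' and i + 1 < len(parts):
--                     roles.append(parts[i + 1])
--         users[name] = {'privilege': priv, 'roles': roles}
--     return users
--
-- def _ac_limit_transactions(lines):
--     low = [l.lower() for l in lines]
--     config_text = '\n'.join(low)
--     has_enable_secret = any(l.strip().startswith('enable secret') for l in low)
--     users = _parse_user_privileges(lines)
--     any_restricted = any((u['privilege'] is not None and u['privilege'] < 15) or (u['roles']) for u in users.values())
--     no_telnet = 'transport input telnet' not in config_text
--     return has_enable_secret and (any_restricted or bool(users)) and no_telnet
-- ===== SOURCE B (Python) =====
-- def _ac_limit_transactions(lines):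
--     has_secret = False
--     saw_user = False
--     telnet = False
--     for raw in lines:
--         s = raw.strip().lower()
--         if s.startswith('enable secret'):
--             has_secret = True
--         if s.startswith('username ') and len(s.split()) >= 2:
--             saw_user = True
--         if 'transport input telnet' in raw.lower():
--             telnet = True
--     return has_secret and saw_user and not telnet
-- ===== Notes on version B (the rewrite author's own statement) =====
-- stated objective: simpler
-- what changed: B is a single pass over the lines keeping three booleans; it drops A's user dict and the whole privilege/role parsing (since A's `any_restricted or bool(users)` always collapses to `bool(users)`) and tests the telnet substring per line instead of on the '\n'-joined lowered text.
import Mathlib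
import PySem

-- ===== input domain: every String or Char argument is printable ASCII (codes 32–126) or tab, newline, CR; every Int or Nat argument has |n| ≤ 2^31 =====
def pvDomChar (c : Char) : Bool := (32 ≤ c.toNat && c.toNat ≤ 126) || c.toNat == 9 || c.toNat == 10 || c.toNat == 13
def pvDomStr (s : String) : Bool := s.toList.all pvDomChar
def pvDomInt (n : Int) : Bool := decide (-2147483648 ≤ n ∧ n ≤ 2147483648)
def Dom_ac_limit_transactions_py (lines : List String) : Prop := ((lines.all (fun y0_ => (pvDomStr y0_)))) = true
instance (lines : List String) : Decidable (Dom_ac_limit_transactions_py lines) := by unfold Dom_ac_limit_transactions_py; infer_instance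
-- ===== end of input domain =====

-- B is a single pass keeping three booleans; it drops A's user dict and the whole privilege/role
-- parsing, because A's `any_restricted or bool(users)` collapses to `bool(users)`, and checks the
-- telnet substring per line instead of on the '\n'-joined text (objective: simpler).

-- ===== PORT A =====
-- loop body of _parse_user_privileges
def pvParseStep (users : PySem.Dict String (Option Int × List String)) (raw : String) :
    PySem.Dict String (Option Int × List String) :=
  let low := PySem.Str.lower (PySem.Str.strip raw)
  if !(PySem.Str.startswith low "username ") then users
  else
    let parts := PySem.Str.split₀ low
    if parts.length < 2 then users
    else
      let name := parts.getD 1 ""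
      let priv : Option Int :=
        if PySem.Str.isIn " privilege " low then
          -- try: parts.index('privilege'); int(...) — exceptions leave priv = None
          match PySem.List.index? parts "privilege" with
          | some idx => if idx + 1 < parts.length then PySem.Int.ofStr? (parts.getD (idx + 1) "") else none
          | none => none
        else none
      let roles : List String :=
        if PySem.Str.isIn " role " low then
          (PySem.List.enumerate parts).foldl
            (fun rs p =>
              if p.2 == "role" && decide (p.1 + 1 < (parts.length : Int)) then
                rs ++ [parts.getD (p.1 + 1).toNat ""]
              else rs) []
        else []
      PySem.Dict.insert users name (priv, roles)

def pvParseUserPrivileges (lines : List String) : PySem.Dict String (Option Int × List String) :=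
  lines.foldl pvParseStep ⟨[]⟩

def ac_limit_transactions_py (lines : List String) : Bool :=
  let low := lines.map PySem.Str.lower
  let config_text := PySem.Str.join "\n" low
  let has_enable_secret := low.any (fun l => PySem.Str.startswith (PySem.Str.strip l) "enable secret")
  let users := pvParseUserPrivileges lines
  let any_restricted := (PySem.Dict.values users).any
    (fun u => (match u.1 with | some p => decide (p < 15) | none => false) || !u.2.isEmpty)
  let no_telnet := !(PySem.Str.isIn "transport input telnet" config_text)
  has_enable_secret && (any_restricted || !users.items.isEmpty) && no_telnet

-- ===== PORT B =====
-- loop body of B's single pass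
def pvAltStep (st : Bool × Bool × Bool) (raw : String) : Bool × Bool × Bool :=
  let s := PySem.Str.lower (PySem.Str.strip raw)
  (st.1 || PySem.Str.startswith s "enable secret",
   st.2.1 || (PySem.Str.startswith s "username " && decide (2 ≤ (PySem.Str.split₀ s).length)),
   st.2.2 || PySem.Str.isIn "transport input telnet" (PySem.Str.lower raw))

def ac_limit_transactions_py_alt (lines : List String) : Bool :=
  let st := lines.foldl pvAltStep (false, false, false)
  st.1 && st.2.1 && !st.2.2

-- ===== PRECONDITION & SPEC =====
def Spec_ac_limit_transactions_py (lines : List String) (out : Bool) : Prop := out = ac_limit_transactions_py_alt lines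
instance (lines : List String) (out : Bool) : Decidable (Spec_ac_limit_transactions_py lines out) := by unfold Spec_ac_limit_transactions_py; infer_instance

-- ===== CLAIM (what is proved, stated in full; the proofs are below) =====
def Claim_equal_ac_limit_transactions_py : Prop := ∀ (lines : List String), Dom_ac_limit_transactions_py lines → Spec_ac_limit_transactions_py lines (ac_limit_transactions_py lines)

-- ===== LEMMAS AND PROOFS =====

-- the three per-line tests B maintains
def pvSecretLine (raw : String) : Bool :=
  PySem.Str.startswith (PySem.Str.lower (PySem.Str.strip raw)) "enable secret"
def pvUserLine (raw : String) : Bool :=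
  PySem.Str.startswith (PySem.Str.lower (PySem.Str.strip raw)) "username " &&
    decide (2 ≤ (PySem.Str.split₀ (PySem.Str.lower (PySem.Str.strip raw))).length)
def pvTelnetLine (raw : String) : Bool :=
  PySem.Str.isIn "transport input telnet" (PySem.Str.lower raw)

theorem isspace_lowerChar (c : Char) : PySem.Chars.isspace (PySem.Chars.lowerChar c) = PySem.Chars.isspace c := by
  unfold PySem.Chars.lowerChar PySem.Chars.isupper
  split
  · next h =>
    simp only [Bool.and_eq_true, decide_eq_true_eq, Char.le_def] at h
    have h1 : 65 ≤ c.toNat := h.1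
    have h2 : c.toNat ≤ 90 := h.2
    have hv : (c.toNat + 32).isValidChar := by left; omega
    have ht : (Char.ofNat (c.toNat + 32)).toNat = c.toNat + 32 := by
      rw [Char.ofNat, dif_pos hv]; exact Char.toNat_ofNatAux hv
    unfold PySem.Chars.isspace
    simp only [ht]
    have : ∀ b1 b2 : Bool, b1 = false → b2 = false → b1 = b2 := by decide
    apply this <;> · simp only [Bool.or_eq_false_iff, Bool.and_eq_false_iff, decide_eq_false_iff_not]; omega
  · rfl

theorem strip_lower_comm (cs : List Char) :
    PySem.Chars.strip (PySem.Chars.lower cs) = PySem.Chars.lower (PySem.Chars.strip cs) := by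
  unfold PySem.Chars.strip PySem.Chars.rstrip PySem.Chars.lstrip PySem.Chars.lower
  have hp : (PySem.Chars.isspace ∘ PySem.Chars.lowerChar) = PySem.Chars.isspace := by
    funext c; exact isspace_lowerChar c
  rw [List.dropWhile_map, hp, ← List.map_reverse, List.dropWhile_map, hp, ← List.map_reverse]

theorem str_strip_lower (s : String) :
    PySem.Str.strip (PySem.Str.lower s) = PySem.Str.lower (PySem.Str.strip s) := by
  apply String.toList_inj.mp
  rw [PySem.Str.toList_strip, PySem.Str.toList_lower, PySem.Str.toList_lower, PySem.Str.toList_strip]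
  exact strip_lower_comm _

theorem prefix_drop_cons {p u v : List Char} {c : Char} (h : p <+: u ++ c :: v) (hc : c ∉ p) : p <+: u := by
  induction p generalizing u with
  | nil => exact List.nil_prefix
  | cons d p' ih =>
    cases u with
    | nil =>
      rw [List.nil_append] at h
      obtain ⟨t, ht⟩ := h
      simp at ht
      exact absurd (ht.1 ▸ List.mem_cons_self) hc
    | cons e u' =>
      obtain ⟨t, ht⟩ := h
      simp at ht
      obtain ⟨rfl, ht2⟩ := ht
      exact (List.prefix_cons_inj d).mpr (ih ⟨t, ht2⟩ (fun hm => hc (List.mem_cons_of_mem _ hm)))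

theorem infix_split {p u v : List Char} {c : Char} (h : p <:+: u ++ c :: v) (hc : c ∉ p) :
    p <:+: u ∨ p <:+: v := by
  induction u with
  | nil =>
    rw [List.nil_append] at h
    rcases (List.infix_cons_iff.mp h) with hpre | hinf
    · left
      cases p with
      | nil => exact List.nil_infix
      | cons d p' =>
        obtain ⟨t, ht⟩ := hpre
        simp at ht
        exact absurd (ht.1 ▸ List.mem_cons_self) hc
    · exact Or.inr hinf
  | cons a u' ih =>
    rcases (List.infix_cons_iff.mp h) with hpre | hinf
    · exact Or.inl (prefix_drop_cons (by simpa using hpre) hc).isInfix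
    · rcases ih (by simpa using hinf) with h1 | h2
      · exact Or.inl (h1.trans (List.suffix_cons a u').isInfix)
      · exact Or.inr h2

theorem infix_intercalate_iff (p : List Char) (c : Char) (hp : p ≠ []) (hc : c ∉ p) (ls : List (List Char)) :
    p <:+: List.intercalate [c] ls ↔ ∃ l ∈ ls, p <:+: l := by
  induction ls with
  | nil =>
    simp [List.intercalate]
    intro h; exact hp h
  | cons l ls ih =>
    cases ls with
    | nil => simp [List.intercalate]
    | cons l2 ls2 =>
      have hcc : List.intercalate [c] (l :: l2 :: ls2) = l ++ [c] ++ List.intercalate [c] (l2 :: ls2) := by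
        simp [List.intercalate]
      rw [hcc]
      constructor
      · intro h
        rw [List.append_assoc] at h
        rcases infix_split (by simpa using h) hc with h1 | h2
        · exact ⟨l, List.mem_cons_self, h1⟩
        · obtain ⟨x, hx, hxi⟩ := ih.mp h2
          exact ⟨x, List.mem_cons_of_mem _ hx, hxi⟩
      · rintro ⟨x, hx, hxi⟩
        rcases List.mem_cons.mp hx with rfl | hx2
        · exact hxi.trans (by rw [List.append_assoc]; exact (List.prefix_append _ _).isInfix)
        · refine (ih.mpr ⟨x, hx2, hxi⟩).trans ?_
          exact (List.suffix_append _ _).isInfix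

theorem telnet_eq (lines : List String) :
    PySem.Str.isIn "transport input telnet" (PySem.Str.join "\n" (lines.map PySem.Str.lower))
      = lines.any pvTelnetLine := by
  rw [Bool.eq_iff_iff, PySem.Str.isIn_iff_infix]
  have hjoin : (PySem.Str.join "\n" (lines.map PySem.Str.lower)).toList
      = List.intercalate ['\n'] (lines.map (fun s => PySem.Chars.lower s.toList)) := by
    simp [PySem.Str.join, PySem.Chars.join, List.map_map, Function.comp_def]
  rw [hjoin, infix_intercalate_iff _ _ (by decide) (by decide), List.any_eq_true]
  constructor
  · rintro ⟨l, hl, hi⟩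
    obtain ⟨raw, hraw, rfl⟩ := List.mem_map.mp hl
    refine ⟨raw, hraw, ?_⟩
    rw [pvTelnetLine, PySem.Str.isIn_iff_infix, PySem.Str.toList_lower]
    exact hi
  · rintro ⟨raw, hraw, hi⟩
    rw [pvTelnetLine, PySem.Str.isIn_iff_infix, PySem.Str.toList_lower] at hi
    exact ⟨_, List.mem_map_of_mem hraw, hi⟩

theorem secret_eq (lines : List String) :
    (lines.map PySem.Str.lower).any (fun l => PySem.Str.startswith (PySem.Str.strip l) "enable secret")
      = lines.any pvSecretLine := by
  have hf : ((fun l => PySem.Str.startswith (PySem.Str.strip l) "enable secret") ∘ PySem.Str.lower)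
      = pvSecretLine := by
    funext raw
    simp only [Function.comp_apply]
    rw [pvSecretLine, str_strip_lower]
  rw [List.any_map, hf]

theorem insert_items_isEmpty {κ ν : Type} [BEq κ] (d : PySem.Dict κ ν) (k : κ) (v : ν) :
    (PySem.Dict.insert d k v).items.isEmpty = false := by
  unfold PySem.Dict.insert
  split
  · next h =>
    unfold PySem.Dict.contains at h
    cases hd : d.items with
    | nil => rw [hd] at h; simp at h
    | cons a t => simp
  · simp

theorem parse_step_isEmpty (d : PySem.Dict String (Option Int × List String)) (raw : String) :
    (pvParseStep d raw).items.isEmpty = (d.items.isEmpty && !pvUserLine raw) := by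
  by_cases h1 : PySem.Str.startswith (PySem.Str.lower (PySem.Str.strip raw)) "username "
  · by_cases h2 : (PySem.Str.split₀ (PySem.Str.lower (PySem.Str.strip raw))).length < 2
    · have h2' : decide (2 ≤ (PySem.Str.split₀ (PySem.Str.lower (PySem.Str.strip raw))).length) = false := by
        rw [decide_eq_false_iff_not]; omega
      simp only [pvParseStep, pvUserLine, h1, h2', Bool.not_true, Bool.false_eq_true, if_false,
        if_pos h2, Bool.and_false, Bool.not_false, Bool.and_true]
    · have h2' : decide (2 ≤ (PySem.Str.split₀ (PySem.Str.lower (PySem.Str.strip raw))).length) = true := by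
        rw [decide_eq_true_eq]; omega
      simp only [pvParseStep, pvUserLine, h1, h2', Bool.not_true, Bool.false_eq_true, if_false,
        if_neg h2, insert_items_isEmpty, Bool.and_true, Bool.not_true, Bool.and_false]
  · have h1' : PySem.Str.startswith (PySem.Str.lower (PySem.Str.strip raw)) "username " = false := by
      simpa using h1
    simp only [pvParseStep, pvUserLine, h1', Bool.not_false, if_true, Bool.false_and,
      Bool.not_false, Bool.and_true]

theorem parse_foldl_isEmpty (lines : List String) :
    ∀ d : PySem.Dict String (Option Int × List String),
      (lines.foldl pvParseStep d).items.isEmpty = (d.items.isEmpty && !(lines.any pvUserLine)) := by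
  induction lines with
  | nil => intro d; simp
  | cons a t ih =>
    intro d
    rw [List.foldl_cons, ih, parse_step_isEmpty]
    simp [Bool.and_assoc]

theorem any_or_nonempty {ν : Type} (f : ν → Bool) (d : PySem.Dict String ν) :
    ((PySem.Dict.values d).any f || !d.items.isEmpty) = !d.items.isEmpty := by
  cases h : d.items with
  | nil => simp [PySem.Dict.values, h]
  | cons a t => simp [PySem.Dict.values, h]

theorem alt_foldl (lines : List String) : ∀ b1 b2 b3 : Bool,
    lines.foldl pvAltStep (b1, b2, b3)
      = (b1 || lines.any pvSecretLine, b2 || lines.any pvUserLine, b3 || lines.any pvTelnetLine) := by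
  induction lines with
  | nil => intro b1 b2 b3; simp
  | cons a t ih =>
    intro b1 b2 b3
    rw [List.foldl_cons]
    have hstep : pvAltStep (b1, b2, b3) a = (b1 || pvSecretLine a, b2 || pvUserLine a, b3 || pvTelnetLine a) := rfl
    rw [hstep, ih]
    simp [Bool.or_assoc]

theorem main_eq (lines : List String) :
    ac_limit_transactions_py lines = ac_limit_transactions_py_alt lines := by
  unfold ac_limit_transactions_py ac_limit_transactions_py_alt
  rw [alt_foldl]
  simp only [Bool.false_or]
  rw [telnet_eq, secret_eq, any_or_nonempty]
  have husers : (!(pvParseUserPrivileges lines).items.isEmpty) = lines.any pvUserLine := by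
    rw [pvParseUserPrivileges, parse_foldl_isEmpty]
    simp
  rw [husers]

-- ===== VERDICT (by name: the statement is the Claim_ definition above) =====
theorem ac_limit_transactions_py_spec : Claim_equal_ac_limit_transactions_py := by
  intro lines _
  unfold Spec_ac_limit_transactions_py
  exact main_eq lines
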